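-- pv_equiv track=rewrite | github.com/theHdd4/TrinityFastAPIDjangoReact | TrinityAI/Agent_fetch_atom/llm2.py | _extract_recommendation
-- ===== SOURCE A (Python) =====
-- def _extract_recommendation(final_response: str) -> str:
--     lines = final_response.split('\n')
--     for line in lines:
--         line = line.strip()
--         if any(keyword in line.lower() for keyword in ['recommend', 'suggest', 'start with', 'best approach']):
--             return line
--     for line in lines:
--         if len(line.strip()) > 25:
--             return line.strip()
--     return "Check the detailed analysis above for guidance."
-- ===== SOURCE B (Python) =====
-- def _extract_recommendation(final_response: str) -> str:
--     keywords = ['recommend', 'suggest', 'start with', 'best approach']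
--     fallback = None
--     for line in final_response.split('\n'):
--         stripped = line.strip()
--         if any(k in stripped.lower() for k in keywords):
--             return stripped
--         if fallback is None and len(stripped) > 25:
--             fallback = stripped
--     return fallback if fallback is not None else "Check the detailed analysis above for guidance."
-- ===== Notes on version B (the rewrite author's own statement) =====
-- stated objective: simpler
-- what changed: Single pass over the split lines with an Option fallback accumulator, instead of A's two separate scans (keyword scan, then long-line scan).
import Mathlib
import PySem

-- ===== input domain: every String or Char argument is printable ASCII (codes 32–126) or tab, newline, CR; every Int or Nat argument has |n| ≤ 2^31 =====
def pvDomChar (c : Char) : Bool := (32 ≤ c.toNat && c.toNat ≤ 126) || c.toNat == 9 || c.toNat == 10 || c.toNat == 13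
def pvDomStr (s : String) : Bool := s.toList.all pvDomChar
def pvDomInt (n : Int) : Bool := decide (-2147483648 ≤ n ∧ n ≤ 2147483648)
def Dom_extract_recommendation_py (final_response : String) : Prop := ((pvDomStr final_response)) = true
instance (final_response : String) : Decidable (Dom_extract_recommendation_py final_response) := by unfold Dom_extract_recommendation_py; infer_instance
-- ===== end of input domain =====

-- B collapses A's two scans over the split lines into one pass that records the
-- first long stripped line as an Option fallback while still returning keyword
-- matches immediately (objective: simpler, one traversal instead of two).


-- ===== PORT A =====
-- 'any(keyword in line.lower() for keyword in [...])' on an already-stripped line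
def pvHasKeyword (s : String) : Bool :=
  ["recommend", "suggest", "start with", "best approach"].any
    (fun k => PySem.Str.isIn k (PySem.Str.lower s))

-- first loop of A: return line.strip() at the first keyword match
def pvFirstKw : List String → Option String
  | [] => none
  | l :: rest =>
      let s := PySem.Str.strip l
      if pvHasKeyword s then some s else pvFirstKw rest

-- second loop of A: return line.strip() at the first line with len(line.strip()) > 25
def pvFirstLong : List String → Option String
  | [] => none
  | l :: rest =>
      if PySem.Str.len (PySem.Str.strip l) > 25 then some (PySem.Str.strip l)
      else pvFirstLong rest

def extract_recommendation_py (final_response : String) : String :=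
  let lines := (PySem.Str.split? final_response "\n").getD []   -- sep ≠ "", never none
  match pvFirstKw lines with
  | some s => s
  | none =>
      match pvFirstLong lines with
      | some s => s
      | none => "Check the detailed analysis above for guidance."

-- ===== PORT B =====
-- single pass: return immediately on a keyword match, record the first long
-- stripped line in the Option accumulator, resolve it after the loop
def pvAltLoop : List String → Option String → String
  | [], fallback => fallback.getD "Check the detailed analysis above for guidance."
  | l :: rest, fallback =>
      let s := PySem.Str.strip l
      if pvHasKeyword s then s
      else pvAltLoop rest
        (if fallback.isNone && PySem.Str.len s > 25 then some s else fallback)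

def extract_recommendation_py_alt (final_response : String) : String :=
  pvAltLoop ((PySem.Str.split? final_response "\n").getD []) none

-- ===== PRECONDITION & SPEC =====
def Spec_extract_recommendation_py (final_response : String) (out : String) : Prop := out = extract_recommendation_py_alt final_response
instance (final_response : String) (out : String) : Decidable (Spec_extract_recommendation_py final_response out) := by unfold Spec_extract_recommendation_py; infer_instance

-- ===== CLAIM (what is proved, stated in full; the proofs are below) =====
def Claim_equal_extract_recommendation_py : Prop := ∀ (final_response : String), Dom_extract_recommendation_py final_response → Spec_extract_recommendation_py final_response (extract_recommendation_py final_response)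

-- ===== LEMMAS AND PROOFS =====

-- loop invariant: B's single pass equals A's keyword scan, then the recorded
-- fallback (which has priority over later long lines), then A's long-line scan
theorem pvAltLoop_spec (lines : List String) (fb : Option String) :
    pvAltLoop lines fb =
      match pvFirstKw lines with
      | some s => s
      | none =>
          match fb with
          | some x => x
          | none =>
              match pvFirstLong lines with
              | some s => s
              | none => "Check the detailed analysis above for guidance." := by
  induction lines generalizing fb with
  | nil => cases fb <;> rfl
  | cons l rest ih =>
      simp only [pvAltLoop, pvFirstKw, pvFirstLong]
      by_cases hk : pvHasKeyword (PySem.Str.strip l)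
      · simp [hk]
      · simp only [hk, ih]
        cases fb with
        | some x => simp
        | none =>
            by_cases hl : 25 < (PySem.Chars.strip l.toList).length <;> simp [hl]

-- ===== VERDICT (by name: the statement is the Claim_ definition above) =====
theorem extract_recommendation_py_spec : Claim_equal_extract_recommendation_py := by
  intro fr _
  show _ = _
  unfold extract_recommendation_py extract_recommendation_py_alt
  rw [pvAltLoop_spec]
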